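-- pv_equiv track=rewrite | github.com/n8mills-UI/token-exporter-ds | scripts/audits/lint-css.py | get_css_rule_context
-- ===== SOURCE A (Python) =====
-- def get_css_rule_context(content, line_num):
--     """
--     Extract the full CSS rule context for a given line number.
--     """
--     lines = content.split('\n')
--     if line_num > len(lines):
--         return lines[line_num - 1].strip() if line_num <= len(lines) else ""
--
--     # Look backwards for selector
--     selector_line = line_num - 1
--     while selector_line >= 0:
--         line = lines[selector_line].strip()
--         if '{' in line:
--             # Found opening brace, extract selector
--             selector = line.split('{')[0].strip()
--             return selector
--         elif line and not line.startswith('/*') and not line.startswith('*'):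
--             # This might be a multi-line selector
--             selector_line -= 1
--         else:
--             selector_line -= 1
--
--     return "Unknown selector"
-- ===== SOURCE B (Python) =====
-- def get_css_rule_context(content, line_num):
--     """
--     Extract the full CSS rule context for a given line number.
--     """
--     lines = content.split('\n')
--     if line_num > len(lines):
--         return ""
--     # Single forward pass over lines[:line_num], keeping the LAST brace line seen.
--     found = False
--     selector = ""
--     for i in range(line_num):
--         line = lines[i].strip()
--         if '{' in line:
--             found = True
--             selector = line.split('{')[0].strip()
--     return selector if found else "Unknown selector"
-- ===== Notes on version B (the rewrite author's own statement) =====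
-- stated objective: simpler
-- what changed: Replaces the backward while-loop that stops at the first brace line (with two collapsed dead branches) by a single forward pass over lines[:line_num] keeping the last brace line seen.
import Mathlib
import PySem

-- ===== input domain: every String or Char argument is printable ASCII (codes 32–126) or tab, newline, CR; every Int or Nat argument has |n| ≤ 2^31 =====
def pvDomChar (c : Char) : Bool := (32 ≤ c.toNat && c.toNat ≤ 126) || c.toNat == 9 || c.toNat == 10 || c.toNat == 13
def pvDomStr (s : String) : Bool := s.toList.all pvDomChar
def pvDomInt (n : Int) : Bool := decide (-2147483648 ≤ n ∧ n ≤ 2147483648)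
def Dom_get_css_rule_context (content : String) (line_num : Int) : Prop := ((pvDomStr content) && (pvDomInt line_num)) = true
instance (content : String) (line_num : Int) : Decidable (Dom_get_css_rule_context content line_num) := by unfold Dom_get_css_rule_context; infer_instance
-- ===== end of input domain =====

-- B replaces A's backward stop-at-first-brace while-loop by a forward pass keeping the last brace line (objective: simpler).

-- ===== PORT A =====
-- the while loop 'selector_line = k-1 … while selector_line >= 0: … selector_line -= 1', recursing on k = selector_line + 1
def pvLoopA (lines : List String) : Nat → String
  | 0 => "Unknown selector"
  | k + 1 =>
    let line := PySem.Str.strip (lines.getD k "")   -- lines[selector_line]; index provably in range when entered from the port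
    if PySem.Str.isIn "{" line then
      PySem.Str.strip (((PySem.Str.split? line "{").getD []).getD 0 "")
    else
      -- both remaining branches of A only decrement selector_line
      pvLoopA lines k

def get_css_rule_context (content : String) (line_num : Int) : String :=
  let lines := (PySem.Str.split? content "\n").getD []
  if line_num > (lines.length : Int) then
    ""   -- the guarded expression's first arm is unreachable here (line_num <= len is false)
  else
    pvLoopA lines line_num.toNat   -- line_num ≤ 0 gives toNat = 0: loop never entered

-- ===== PORT B =====
def get_css_rule_context_alt (content : String) (line_num : Int) : String :=
  let lines := (PySem.Str.split? content "\n").getD []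
  if line_num > (lines.length : Int) then
    ""
  else
    let st := (List.range line_num.toNat).foldl
      (fun (acc : Bool × String) i =>
        let line := PySem.Str.strip (lines.getD i "")
        if PySem.Str.isIn "{" line then
          (true, PySem.Str.strip (((PySem.Str.split? line "{").getD []).getD 0 ""))
        else acc)
      (false, "")
    if st.1 then st.2 else "Unknown selector"

-- ===== PRECONDITION & SPEC =====
def Spec_get_css_rule_context (content : String) (line_num : Int) (out : String) : Prop := out = get_css_rule_context_alt content line_num
instance (content : String) (line_num : Int) (out : String) : Decidable (Spec_get_css_rule_context content line_num out) := by unfold Spec_get_css_rule_context; infer_instance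

-- ===== CLAIM (what is proved, stated in full; the proofs are below) =====
def Claim_equal_get_css_rule_context : Prop := ∀ (content : String) (line_num : Int), Dom_get_css_rule_context content line_num → Spec_get_css_rule_context content line_num (get_css_rule_context content line_num)

-- ===== LEMMAS AND PROOFS =====

-- the loop body of port B, named for the proofs (definitionally equal to the lambda in the port)
def pvStepB (lines : List String) (acc : Bool × String) (i : Nat) : Bool × String :=
  let line := PySem.Str.strip (lines.getD i "")
  if PySem.Str.isIn "{" line then
    (true, PySem.Str.strip (((PySem.Str.split? line "{").getD []).getD 0 ""))
  else acc

theorem pvStepB_pos (lines : List String) (acc : Bool × String) (i : Nat)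
    (h : PySem.Str.isIn "{" (PySem.Str.strip (lines.getD i "")) = true) :
    pvStepB lines acc i =
      (true, PySem.Str.strip (((PySem.Str.split? (PySem.Str.strip (lines.getD i "")) "{").getD []).getD 0 "")) := by
  unfold pvStepB
  exact if_pos h

theorem pvStepB_neg (lines : List String) (acc : Bool × String) (i : Nat)
    (h : ¬ PySem.Str.isIn "{" (PySem.Str.strip (lines.getD i "")) = true) :
    pvStepB lines acc i = acc := by
  unfold pvStepB
  exact if_neg h

-- backward stop-at-first-brace equals forward keep-last-brace, for any prefix length k
theorem pvLoopA_eq_fold (lines : List String) (k : Nat) :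
    pvLoopA lines k =
      (if ((List.range k).foldl (pvStepB lines) (false, "")).1
       then ((List.range k).foldl (pvStepB lines) (false, "")).2
       else "Unknown selector") := by
  induction k with
  | zero => rw [List.range_zero, List.foldl_nil, pvLoopA]; rfl
  | succ k ih =>
    rw [List.range_succ, List.foldl_append, List.foldl_cons, List.foldl_nil]
    by_cases h : PySem.Str.isIn "{" (PySem.Str.strip (lines.getD k "")) = true
    · rw [pvStepB_pos lines _ k h, pvLoopA, if_pos h]; rfl
    · rw [pvStepB_neg lines _ k h, pvLoopA, if_neg h]
      exact ih

theorem get_css_rule_context_spec : Claim_equal_get_css_rule_context := by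
  intro content line_num _
  show get_css_rule_context content line_num = get_css_rule_context_alt content line_num
  unfold get_css_rule_context get_css_rule_context_alt
  by_cases h : line_num > (((PySem.Str.split? content "\n").getD []).length : Int)
  · rw [if_pos h, if_pos h]
  · rw [if_neg h, if_neg h, pvLoopA_eq_fold]
    rfl
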